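-- pv_equiv track=rewrite | github.com/MeghV/cse415 | assign1/a1.py | mystery_code
-- ===== SOURCE A (Python) =====
-- def mystery_code(str, transition):
-- 	new_str = ''
-- 	for c in str:
-- 		if c.isalpha():
-- 			if c.islower():
-- 				topOrd = ord('z')
-- 				bottomOrd = ord('a')
-- 				oppositeOperator = lambda x: x.upper()
-- 			else:
-- 				topOrd = ord('Z')
-- 				bottomOrd = ord('A')
-- 				oppositeOperator = lambda x: x.lower()
-- 			total = ord(c) + transition
-- 			if(total > topOrd):
-- 				new_total = bottomOrd + ( total % topOrd ) - 1
-- 			else: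
-- 				new_total = total
-- 			updatedC = oppositeOperator(chr(new_total))
-- 		else:
-- 			updatedC = c
-- 		new_str += updatedC
-- 	return new_str
-- ===== SOURCE B (Python) =====
-- def mystery_code(str, transition):
--     # Build a translation table once (one entry per distinct alphabetic char),
--     # then do a single table-driven pass with str.translate.
--     table = {}
--     for c in set(str):
--         if not c.isalpha():
--             continue
--         lower = c.islower()
--         topOrd = ord('z') if lower else ord('Z')
--         bottomOrd = ord('a') if lower else ord('A')
--         total = ord(c) + transition
--         if total > topOrd:
--             total = bottomOrd + total % topOrd - 1
--         mapped = chr(total)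
--         table[ord(c)] = mapped.upper() if lower else mapped.lower()
--     return str.translate(table)
-- ===== Notes on version B (the rewrite author's own statement) =====
-- stated objective: faster
-- what changed: B precomputes a translation table with one entry per distinct alphabetic character of the input and then applies it in a single str.translate pass, instead of A's per-character inline branching and string concatenation.
import Mathlib
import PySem

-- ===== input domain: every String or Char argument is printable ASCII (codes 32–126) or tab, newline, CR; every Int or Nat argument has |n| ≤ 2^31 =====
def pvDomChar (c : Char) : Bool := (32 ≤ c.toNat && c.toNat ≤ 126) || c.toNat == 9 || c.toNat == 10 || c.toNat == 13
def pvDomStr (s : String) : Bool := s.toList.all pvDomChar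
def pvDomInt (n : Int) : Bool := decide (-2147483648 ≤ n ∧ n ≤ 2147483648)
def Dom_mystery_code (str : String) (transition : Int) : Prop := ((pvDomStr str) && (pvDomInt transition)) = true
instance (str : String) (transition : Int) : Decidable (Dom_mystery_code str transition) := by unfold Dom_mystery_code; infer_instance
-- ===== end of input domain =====

-- B replaces A's per-character inline branching by a precomputed translation table
-- (one dict entry per distinct alphabetic character) plus a single str.translate pass (measured faster).


-- Hand-ported single-character str.upper() / str.lower(): exact for every code point ≤ 217,
-- which covers all characters either program feeds them (the shifted code is always ≤ 217;
-- the only non-ASCII case conversion reached is µ (181) → Μ (924), checked against CPython).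
def pvUpper (c : Char) : Char :=
  if 97 ≤ c.toNat ∧ c.toNat ≤ 122 then Char.ofNat (c.toNat - 32)
  else if c.toNat = 181 then Char.ofNat 924 else c

def pvLower (c : Char) : Char :=
  if 65 ≤ c.toNat ∧ c.toNat ≤ 90 then Char.ofNat (c.toNat + 32) else c

-- ===== PORT A =====
-- Literal transliteration of A: one fold over the characters, branching inline;
-- chr(new_total) is Char.ofNat new_total.toNat (Pre_ excludes the negative codes, where chr raises).
def mystery_code (str : String) (transition : Int) : String :=
  String.ofList ((str.toList).foldl (fun new_str c =>
    let updatedC : Char :=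
      if PySem.Chars.isalpha c then
        let p : Nat × Nat × (Char → Char) :=
          if PySem.Chars.islower c then (122, 97, pvUpper) else (90, 65, pvLower)
        let total : Int := (c.toNat : Int) + transition
        let new_total : Int :=
          if total > (p.1 : Int) then (p.2.1 : Int) + PySem.Int.mod total (p.1 : Int) - 1 else total
        p.2.2 (Char.ofNat new_total.toNat)
      else c
    new_str ++ [updatedC]) [])

-- ===== PORT B =====
-- B-side shift of one character (the body of Source B's table-building loop).
def pvShiftB (transition : Int) (c : Char) : Char :=
  let lower := PySem.Chars.islower c
  let topOrd : Int := if lower then 122 else 90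
  let bottomOrd : Int := if lower then 97 else 65
  let total : Int := (c.toNat : Int) + transition
  let total' : Int := if total > topOrd then bottomOrd + PySem.Int.mod total topOrd - 1 else total
  let mapped : Char := Char.ofNat total'.toNat
  if lower then pvUpper mapped else pvLower mapped

-- table over the distinct characters of str (keyed by ord(c)), then str.translate(table).
def mystery_code_alt (str : String) (transition : Int) : String :=
  let table : PySem.Dict Nat Char :=
    (PySem.Set.ofList str.toList).foldl
      (fun d c => if PySem.Chars.isalpha c then PySem.Dict.insert d c.toNat (pvShiftB transition c) else d)
      PySem.Dict.empty
  String.ofList (str.toList.map (fun c => (PySem.Dict.get? table c.toNat).getD c))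

-- ===== PRECONDITION & SPEC =====
-- A (and B alike) raises ValueError in chr() when some alphabetic character's code plus
-- transition is negative; Pre_ excludes exactly those inputs, nothing else.
def Pre_mystery_code (str : String) (transition : Int) : Prop :=
  (str.toList.all (fun c => !PySem.Chars.isalpha c || decide (0 ≤ (c.toNat : Int) + transition))) = true
instance (str : String) (transition : Int) : Decidable (Pre_mystery_code str transition) := by
  unfold Pre_mystery_code; infer_instance

def pvWitness_mystery_code : String × Int := ("Az b!", 7)

def Spec_mystery_code (str : String) (transition : Int) (out : String) : Prop := out = mystery_code_alt str transition
instance (str : String) (transition : Int) (out : String) : Decidable (Spec_mystery_code str transition out) := by unfold Spec_mystery_code; infer_instance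

-- ===== CLAIM (what is proved, stated in full; the proofs are below) =====
def Claim_equal_mystery_code : Prop := ∀ (str : String) (transition : Int), Dom_mystery_code str transition → Pre_mystery_code str transition → Spec_mystery_code str transition (mystery_code str transition)

-- ===== LEMMAS AND PROOFS =====

-- A's per-character result is B's shift function (cases on the lower/upper branch).
theorem pvPerChar_eq (transition : Int) (c : Char) :
    (if PySem.Chars.isalpha c then
        let p : Nat × Nat × (Char → Char) :=
          if PySem.Chars.islower c then (122, 97, pvUpper) else (90, 65, pvLower)
        let total : Int := (c.toNat : Int) + transition
        let new_total : Int :=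
          if total > (p.1 : Int) then (p.2.1 : Int) + PySem.Int.mod total (p.1 : Int) - 1 else total
        p.2.2 (Char.ofNat new_total.toNat)
      else c)
    = if PySem.Chars.isalpha c then pvShiftB transition c else c := by
  by_cases h : PySem.Chars.isalpha c <;> by_cases hl : PySem.Chars.islower c <;>
    simp [h, hl, pvShiftB]

-- lookup in the table built by the conditional-insert fold
theorem pvTableGet (transition : Int) (l : List Char) (d : PySem.Dict Nat Char) (c : Char) :
    PySem.Dict.get? (l.foldl
      (fun d c => if PySem.Chars.isalpha c then PySem.Dict.insert d c.toNat (pvShiftB transition c) else d) d) c.toNat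
    = if c ∈ l ∧ PySem.Chars.isalpha c then some (pvShiftB transition c) else PySem.Dict.get? d c.toNat := by
  induction l generalizing d with
  | nil => simp
  | cons x xs ih =>
    simp only [List.foldl_cons, ih]
    by_cases hmem : c ∈ xs ∧ PySem.Chars.isalpha c
    · simp [hmem]
    · simp only [if_neg hmem]
      by_cases hx : PySem.Chars.isalpha x
      · simp only [if_pos hx]
        by_cases hcx : c = x
        · subst hcx
          rw [PySem.Dict.get?_insert_self]
          simp [hx]
        · rw [PySem.Dict.get?_insert_of_ne _ _ (by
            intro h
            exact hcx (Char.ext (UInt32.toNat_inj.mp h)))]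
          rw [if_neg (by
            rintro ⟨hm, ha⟩
            rcases List.mem_cons.mp hm with h | h
            exacts [hcx h, hmem ⟨h, ha⟩])]
      · simp only [if_neg hx]
        rw [if_neg (by
          rintro ⟨hm, ha⟩
          rcases List.mem_cons.mp hm with h | h
          · exact hx (h ▸ ha)
          · exact hmem ⟨h, ha⟩)]

-- ===== VERDICT (by name: the statement is the Claim_ definition above) =====
theorem mystery_code_spec : Claim_equal_mystery_code := by
  intro str transition _ _
  unfold Spec_mystery_code mystery_code mystery_code_alt
  rw [PySem.List.foldl_append_singleton_eq_map]
  congr 1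
  apply List.map_congr_left
  intro c hc
  rw [pvPerChar_eq, pvTableGet]
  have hmem : c ∈ PySem.Set.ofList str.toList := (PySem.Set.mem_ofList _ _).mpr hc
  by_cases h : PySem.Chars.isalpha c <;> simp [h, hmem]
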